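-- pv_equiv track=rewrite | github.com/tasumermaf/rhombic | rhombic/polyhedron.py | _build_faces
-- ===== SOURCE A (Python) =====
-- def _build_faces(edges: list[tuple[int, int]]) -> list[list[int]]:
--     """Compute the 12 rhombic faces.
--
--     Each face is a rhombus with 4 vertices: 2 cubic + 2 octahedral,
--     alternating around the boundary. Two vertices share a face if they
--     are connected by a path of length 2 through the face's other vertices.
--     """
--     # Build adjacency
--     adj: dict[int, set[int]] = {i: set() for i in range(14)}
--     for u, v in edges:
--         adj[u].add(v)
--         adj[v].add(u)
--
--     faces = []
--     seen: set[frozenset[int]] = set()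
--
--     # Each face has exactly 2 cubic and 2 octahedral vertices.
--     # Two cubic vertices c1, c2 and two octahedral vertices o1, o2
--     # form a face when c1-o1, c1-o2, c2-o1, c2-o2 are all edges.
--     for c1 in range(8):
--         oct_neighbors_c1 = adj[c1]
--         for c2 in range(c1 + 1, 8):
--             oct_neighbors_c2 = adj[c2]
--             shared_oct = oct_neighbors_c1 & oct_neighbors_c2
--             if len(shared_oct) == 2:
--                 o1, o2 = sorted(shared_oct)
--                 face_key = frozenset([c1, c2, o1, o2])
--                 if face_key not in seen:
--                     seen.add(face_key)
--                     faces.append(sorted([c1, c2, o1, o2]))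
--
--     return faces
-- ===== SOURCE B (Python) =====
-- def _build_faces(edges: list[tuple[int, int]]) -> list[list[int]]:
--     """Compute the 12 rhombic faces from a pair -> common-neighbors index.
--
--     Adjacency is kept as 14 neighbor lists.  One scatter pass registers
--     each vertex w under an integer code c1*14+c2 for every pair c1 < c2
--     of its cubic (< 8) neighbors; the faces are then read off the index
--     in ascending code (= lexicographic pair) order.
--     """
--     nbrs: list[list[int]] = [[] for _ in range(14)]
--     for u, v in edges:
--         if v not in nbrs[u]:
--             nbrs[u].append(v)
--         if u not in nbrs[v]:
--             nbrs[v].append(u)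
--
--     index: dict[int, list[int]] = {}
--     for w in range(14):
--         cubs = sorted(x for x in nbrs[w] if x < 8)
--         rest = cubs
--         while rest:
--             c1, rest = rest[0], rest[1:]
--             for c2 in rest:
--                 index.setdefault(c1 * 14 + c2, []).append(w)
--
--     faces: list[list[int]] = []
--     seen: list[set[int]] = []
--     for code in sorted(index):
--         shared = index[code]
--         if len(shared) == 2:
--             c1, c2 = divmod(code, 14)
--             o1, o2 = shared
--             key = {c1, c2, o1, o2}
--             if key not in seen:
--                 seen.append(key)
--                 faces.append(sorted([c1, c2, o1, o2]))
--     return faces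
-- ===== Notes on version B (the rewrite author's own statement) =====
-- stated objective: alternative
-- what changed: B keeps adjacency as 14 plain neighbor lists instead of a dict of sets and, instead of intersecting the adjacency sets of every cubic pair, makes one scatter pass that registers each vertex under an integer pair code c1*14+c2 in a dict, then reads the faces off the index in ascending code order; per-pair set intersection disappears.
import Mathlib
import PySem

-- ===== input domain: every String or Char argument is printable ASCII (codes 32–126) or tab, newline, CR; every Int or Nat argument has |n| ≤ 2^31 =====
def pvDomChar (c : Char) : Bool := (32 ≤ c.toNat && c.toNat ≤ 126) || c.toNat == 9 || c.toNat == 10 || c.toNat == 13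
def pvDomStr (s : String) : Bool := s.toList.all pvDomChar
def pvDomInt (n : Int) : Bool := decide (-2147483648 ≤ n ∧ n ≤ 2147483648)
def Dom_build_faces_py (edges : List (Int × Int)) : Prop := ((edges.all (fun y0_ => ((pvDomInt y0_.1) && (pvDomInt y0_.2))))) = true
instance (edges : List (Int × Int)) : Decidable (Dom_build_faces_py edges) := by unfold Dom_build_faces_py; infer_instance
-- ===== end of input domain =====

-- B keeps adjacency as 14 neighbor lists and replaces the per-pair set intersections by a
-- scatter pass that indexes each vertex under an integer pair code c1*14+c2, reading the
-- faces off the index in ascending code order (objective: alternative).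

-- ===== PORT A =====
-- adjacency building: 'adj = {i: set() for i in range(14)}; for u, v in edges: adj[u].add(v); adj[v].add(u)'
-- none = Python KeyError on 'adj[u]' / 'adj[v]' (endpoint outside range(14)); excluded by Pre_.
def pvAdjStep (od : Option (PySem.Dict Int (PySem.Set Int))) (e : Int × Int) :
    Option (PySem.Dict Int (PySem.Set Int)) :=
  match od with
  | none => none
  | some d =>
    match d.get? e.1 with
    | none => none
    | some su =>
      let d1 := d.insert e.1 (PySem.Set.add su e.2)
      match d1.get? e.2 with
      | none => none
      | some sv => some (d1.insert e.2 (PySem.Set.add sv e.1))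

def pvAdjInit : PySem.Dict Int (PySem.Set Int) :=
  (PySem.List.pyRange 0 14 1).foldl (fun d i => d.insert i PySem.Set.empty) PySem.Dict.empty

def pvAdj (edges : List (Int × Int)) : Option (PySem.Dict Int (PySem.Set Int)) :=
  edges.foldl pvAdjStep (some pvAdjInit)

-- 'adj[c1]' / 'adj[c2]' is ported via getD: c1, c2 ∈ range(8) are always keys of adj.
-- 'len(shared_oct)' is shared.length: a PySem.Set holds its distinct elements.
-- 'seen' (a set of frozensets) is a list of PySem.Sets; 'face_key not in seen' is
-- frozenset equality, i.e. PySem.Set.equal.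
def build_faces_py (edges : List (Int × Int)) : List (List Int) :=
  match pvAdj edges with
  | none => []
  | some adj =>
    ((PySem.List.pyRange 0 8 1).foldl (fun st c1 =>
      let n1 := adj.getD c1 PySem.Set.empty
      (PySem.List.pyRange (c1 + 1) 8 1).foldl (fun st c2 =>
        let n2 := adj.getD c2 PySem.Set.empty
        let shared := PySem.Set.inter n1 n2
        if shared.length = 2 then
          match PySem.List.sorted shared (fun x => x) false with
          | [o1, o2] =>
            let key := PySem.Set.ofList [c1, c2, o1, o2]
            if st.2.any (fun s => PySem.Set.equal s key) then st
            else (st.1 ++ [PySem.List.sorted [c1, c2, o1, o2] (fun x => x) false],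
                  st.2 ++ [key])
          | _ => st
        else st) st)
      (([], []) : List (List Int) × List (PySem.Set Int))).1

-- ===== PORT B =====
-- 'if v not in nbrs[u]: nbrs[u].append(v)' on the list fetched at index u
def pvNbrAdd (l : List Int) (v : Int) : List Int :=
  if v ∈ l then l else l ++ [v]

-- one edge: two guarded appends through pyGet?/pySet? (none = IndexError; excluded by Pre_)
def pvNbrsStep (ol : Option (List (List Int))) (e : Int × Int) : Option (List (List Int)) :=
  match ol with
  | none => none
  | some ns =>
    match PySem.List.pyGet? ns e.1 with
    | none => none
    | some lu =>
      match PySem.List.pySet? ns e.1 (pvNbrAdd lu e.2) with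
      | none => none
      | some ns1 =>
        match PySem.List.pyGet? ns1 e.2 with
        | none => none
        | some lv => PySem.List.pySet? ns1 e.2 (pvNbrAdd lv e.1)

-- 'nbrs = [[] for _ in range(14)]' then the edge loop
def pvNbrs (edges : List (Int × Int)) : Option (List (List Int)) :=
  edges.foldl pvNbrsStep (some (List.replicate 14 []))

-- the 'while rest: c1, rest = rest[0], rest[1:]; for c2 in rest: index.setdefault(...).append(w)' loop
def pvScatter (w : Int) : List Int → PySem.Dict Int (List Int) → PySem.Dict Int (List Int)
  | [], d => d
  | c1 :: rest, d =>
      pvScatter w rest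
        (rest.foldl (fun d c2 => d.modify (c1 * 14 + c2) [] (fun l => l ++ [w])) d)

-- 'for w in range(14): cubs = sorted(x for x in nbrs[w] if x < 8); <scatter>'
def pvIndex (ns : List (List Int)) : PySem.Dict Int (List Int) :=
  (PySem.List.pyRange 0 14 1).foldl (fun d w =>
    pvScatter w
      (PySem.List.sorted ((PySem.List.pyGetD ns w []).filter (fun x => decide (x < 8)))
        (fun x => x) false) d)
    PySem.Dict.empty

-- 'for code in sorted(index): shared = index[code]; ...'; 'index[code]' is getD (code is a key),
-- 'divmod(code, 14)' is floordiv/mod (divisor 14 ≠ 0, never raises), 'o1, o2 = shared' reads the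
-- two elements (in range under the len == 2 guard); 'key not in seen' is Python set equality.
def build_faces_py_alt (edges : List (Int × Int)) : List (List Int) :=
  (pvNbrs edges).elim [] (fun ns =>
    let index := pvIndex ns
    ((PySem.List.sorted index.keys (fun x => x) false).foldl (fun st code =>
      let shared := index.getD code []
      if shared.length = 2 then
        let c1 := PySem.Int.floordiv code 14
        let c2 := PySem.Int.mod code 14
        let o1 := shared.getD 0 0
        let o2 := shared.getD 1 0
        let key := PySem.Set.ofList [c1, c2, o1, o2]
        if st.2.any (fun s => PySem.Set.equal s key) then st
        else (st.1 ++ [PySem.List.sorted [c1, c2, o1, o2] (fun x => x) false],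
              st.2 ++ [key])
      else st)
      (([], []) : List (List Int) × List (PySem.Set Int))).1)

-- ===== PRECONDITION & SPEC =====
-- Pre_ excludes exactly the inputs on which A raises KeyError: an edge endpoint outside range(14).
def Pre_build_faces_py (edges : List (Int × Int)) : Prop :=
  ∀ e ∈ edges, 0 ≤ e.1 ∧ e.1 < 14 ∧ 0 ≤ e.2 ∧ e.2 < 14
instance (edges : List (Int × Int)) : Decidable (Pre_build_faces_py edges) := by
  unfold Pre_build_faces_py; infer_instance
def pvWitness_build_faces_py : (List (Int × Int)) := [(0, 8), (1, 8), (0, 9), (1, 9)]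

def Spec_build_faces_py (edges : List (Int × Int)) (out : List (List Int)) : Prop := out = build_faces_py_alt edges
instance (edges : List (Int × Int)) (out : List (List Int)) : Decidable (Spec_build_faces_py edges out) := by unfold Spec_build_faces_py; infer_instance

-- ===== CLAIM (what is proved, stated in full; the proofs are below) =====
def Claim_equal_build_faces_py : Prop := ∀ (edges : List (Int × Int)), Dom_build_faces_py edges → Pre_build_faces_py edges → Spec_build_faces_py edges (build_faces_py edges)

-- ===== LEMMAS AND PROOFS =====

-- invariant of A's adjacency dict
def pvInv (d : PySem.Dict Int (PySem.Set Int)) : Prop :=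
  d.keys = PySem.List.pyRange 0 14 1 ∧
  (∀ x : Int, (d.getD x PySem.Set.empty).Nodup) ∧
  (∀ x y : Int, y ∈ d.getD x PySem.Set.empty ↔ x ∈ d.getD y PySem.Set.empty) ∧
  (∀ x y : Int, y ∈ d.getD x PySem.Set.empty → 0 ≤ y ∧ y < 14)

-- B's neighbor table carries exactly A's adjacency sets, slot by slot
def pvRel (d : PySem.Dict Int (PySem.Set Int)) (ns : List (List Int)) : Prop :=
  ns.length = 14 ∧ ∀ k : Nat, k < 14 → ns.getD k [] = d.getD (k : Int) PySem.Set.empty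

theorem pvConstFold (l : List Int) (d : PySem.Dict Int (PySem.Set Int))
    (hd : ∀ x, d.getD x PySem.Set.empty = PySem.Set.empty) (x : Int) :
    ((l.foldl (fun d i => d.insert i PySem.Set.empty) d).getD x PySem.Set.empty)
      = PySem.Set.empty := by
  induction l generalizing d with
  | nil => exact hd x
  | cons i l ih =>
    refine ih _ (fun x => ?_)
    rw [PySem.Dict.getD_insert]
    split
    · rfl
    · exact hd _

theorem pvAdjInit_getD (x : Int) : pvAdjInit.getD x PySem.Set.empty = PySem.Set.empty :=
  pvConstFold _ _ (fun x => by simp) x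

theorem pvInv_init : pvInv pvAdjInit := by
  refine ⟨by decide, ?_, ?_, ?_⟩
  · intro x; rw [pvAdjInit_getD]; exact List.nodup_nil
  · intro x y; rw [pvAdjInit_getD, pvAdjInit_getD]; simp [PySem.Set.empty]
  · intro x y hy; rw [pvAdjInit_getD] at hy; exact absurd hy (List.not_mem_nil)

theorem pvRel_init : pvRel pvAdjInit (List.replicate 14 []) := by
  refine ⟨by simp, fun k hk => ?_⟩
  rw [pvAdjInit_getD]
  interval_cases k <;> rfl

-- 'if v not in nbrs[u]' is exactly the set.add guard
theorem pvNbrAdd_eq_add (l : List Int) (v : Int) : pvNbrAdd l v = PySem.Set.add l v := by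
  rw [pvNbrAdd, PySem.Set.add_eq_ite]

-- joint step: one edge advances both adjacency representations in lock step
theorem pvStep_joint (d : PySem.Dict Int (PySem.Set Int)) (ns : List (List Int))
    (hd : pvInv d) (hr : pvRel d ns) (u v : Int)
    (hu : 0 ≤ u ∧ u < 14) (hv : 0 ≤ v ∧ v < 14) :
    ∃ d' ns', pvAdjStep (some d) (u, v) = some d' ∧ pvNbrsStep (some ns) (u, v) = some ns' ∧
      pvInv d' ∧ pvRel d' ns' := by
  obtain ⟨hkeys, hnd, hsym, hbd⟩ := hd
  obtain ⟨hlen, hrel⟩ := hr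
  have hcu : d.contains u = true := by
    rw [PySem.Dict.contains_eq_decide_mem_keys, hkeys]
    simp only [decide_eq_true_eq, PySem.List.mem_pyRange_one]
    omega
  have hcv : d.contains v = true := by
    rw [PySem.Dict.contains_eq_decide_mem_keys, hkeys]
    simp only [decide_eq_true_eq, PySem.List.mem_pyRange_one]
    omega
  obtain ⟨su, hsu⟩ : ∃ su, d.get? u = some su := by
    rw [PySem.Dict.contains_eq_isSome_get?] at hcu
    exact Option.isSome_iff_exists.mp hcu
  set d1 := d.insert u (PySem.Set.add su v) with hd1
  have hc1v : d1.contains v = true := by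
    rw [hd1, PySem.Dict.contains_insert, hcv, Bool.or_true]
  obtain ⟨sv, hsv⟩ : ∃ sv, d1.get? v = some sv := by
    rw [PySem.Dict.contains_eq_isSome_get?] at hc1v
    exact Option.isSome_iff_exists.mp hc1v
  have hsu' : d.getD u PySem.Set.empty = su := PySem.Dict.getD_of_get?_eq_some d PySem.Set.empty hsu
  have hg1 : ∀ x, d1.getD x PySem.Set.empty
      = if x = u then PySem.Set.add su v else d.getD x PySem.Set.empty :=
    fun x => PySem.Dict.getD_insert d u x (PySem.Set.add su v) PySem.Set.empty
  have hsv' : sv = if v = u then PySem.Set.add su v else d.getD v PySem.Set.empty := by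
    rw [← PySem.Dict.getD_of_get?_eq_some d1 PySem.Set.empty hsv, hg1 v]
  have hget : ∀ x, (d1.insert v (PySem.Set.add sv u)).getD x PySem.Set.empty
      = if x = v then PySem.Set.add sv u else d1.getD x PySem.Set.empty :=
    fun x => PySem.Dict.getD_insert d1 v x (PySem.Set.add sv u) PySem.Set.empty
  have hmem : ∀ x y, (y ∈ (d1.insert v (PySem.Set.add sv u)).getD x PySem.Set.empty ↔
      (y ∈ d.getD x PySem.Set.empty ∨ (x = u ∧ y = v) ∨ (x = v ∧ y = u))) := by
    intro x y
    rw [hget x]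
    by_cases hxv : x = v
    · subst hxv
      rw [if_pos rfl, hsv']
      by_cases hvu : x = u
      · subst hvu
        simp only [hsu']
        simp only [if_true, PySem.Set.mem_add]
        tauto
      · rw [if_neg hvu]
        simp only [PySem.Set.mem_add]
        tauto
    · rw [if_neg hxv, hg1 x]
      by_cases hxu : x = u
      · subst hxu
        rw [if_pos rfl]
        simp only [PySem.Set.mem_add, hsu']
        tauto
      · rw [if_neg hxu]
        tauto
  -- B's side computation
  have hun : u = ((u.toNat : Nat) : Int) := (Int.toNat_of_nonneg hu.1).symm
  have hvn : v = ((v.toNat : Nat) : Int) := (Int.toNat_of_nonneg hv.1).symm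
  have hult : u.toNat < ns.length := by omega
  have hvlt : v.toNat < 14 := by omega
  have hgetu : PySem.List.pyGet? ns u = some (ns.getD u.toNat []) := by
    have h := PySem.List.pyGet?_natCast ns u.toNat
    rw [← hun] at h
    rw [h, List.getElem?_eq_getElem hult, List.getD_eq_getElem?_getD,
      List.getElem?_eq_getElem hult]
    rfl
  set lu := ns.getD u.toNat [] with hlu
  set ns1 := ns.set u.toNat (pvNbrAdd lu v) with hns1
  have hlen1 : ns1.length = 14 := by rw [hns1]; simpa using hlen
  have hsetu : PySem.List.pySet? ns u (pvNbrAdd lu v) = some ns1 := by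
    rw [hun, PySem.List.pySet?_natCast _ _ _ hult]
  have hg1B : ∀ k : Nat, k < 14 → ns1.getD k []
      = if k = u.toNat then pvNbrAdd lu v else ns.getD k [] := by
    intro k hk
    rw [hns1]
    by_cases hku : k = u.toNat
    · subst hku
      simp [List.getD, hult]
    · simp [List.getD, List.getElem?_set_ne (by omega : u.toNat ≠ k), hku]
  have hvlt1 : v.toNat < ns1.length := by omega
  have hgetv : PySem.List.pyGet? ns1 v = some (ns1.getD v.toNat []) := by
    have h := PySem.List.pyGet?_natCast ns1 v.toNat
    rw [← hvn] at h
    rw [h, List.getElem?_eq_getElem hvlt1, List.getD_eq_getElem?_getD,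
      List.getElem?_eq_getElem hvlt1]
    rfl
  set lv := ns1.getD v.toNat [] with hlv
  set ns2 := ns1.set v.toNat (pvNbrAdd lv u) with hns2
  have hsetv : PySem.List.pySet? ns1 v (pvNbrAdd lv u) = some ns2 := by
    rw [hvn, PySem.List.pySet?_natCast _ _ _ hvlt1]
  have hlen2 : ns2.length = 14 := by rw [hns2]; simpa using hlen1
  have hg2B : ∀ k : Nat, k < 14 → ns2.getD k []
      = if k = v.toNat then pvNbrAdd lv u else ns1.getD k [] := by
    intro k hk
    rw [hns2]
    by_cases hkv : k = v.toNat
    · subst hkv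
      simp [List.getD, hvlt1]
    · simp [List.getD, List.getElem?_set_ne (by omega : v.toNat ≠ k), hkv]
  -- the two results
  refine ⟨d1.insert v (PySem.Set.add sv u), ns2, ?_, ?_, ⟨?_, ?_, ?_, ?_⟩, hlen2, ?_⟩
  · simp only [pvAdjStep, hsu]
    rw [← hd1, hsv]
  · simp only [pvNbrsStep, hgetu, hsetu, hgetv, hsetv]
  · rw [PySem.Dict.keys_insert_of_contains _ _ hc1v, hd1,
      PySem.Dict.keys_insert_of_contains _ _ hcu, hkeys]
  · intro x
    rw [hget x]
    have h1 : (d1.getD x PySem.Set.empty).Nodup := by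
      rw [hg1 x]
      split
      · exact PySem.Set.nodup_add _ _ (hsu' ▸ hnd u)
      · exact hnd x
    split
    · refine PySem.Set.nodup_add _ _ ?_
      rw [hsv']
      split
      · exact PySem.Set.nodup_add _ _ (hsu' ▸ hnd u)
      · exact hnd v
    · exact h1
  · intro x y
    rw [hmem x y, hmem y x]
    have hxy := hsym x y
    tauto
  · intro x y hy
    rw [hmem x y] at hy
    rcases hy with h | ⟨_, rfl⟩ | ⟨_, rfl⟩
    · exact hbd x y h
    · exact hv
    · exact hu
  · intro k hk
    have hkiu : ((k : Int) = u) ↔ (k = u.toNat) := by omega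
    have hkiv : ((k : Int) = v) ↔ (k = v.toNat) := by omega
    have hrelu : lu = su := by rw [hlu, hrel u.toNat (by omega), ← hun, hsu']
    have hrelv : lv = sv := by
      rw [hlv, hg1B v.toNat hvlt, hsv']
      by_cases hvu : v = u
      · rw [if_pos (by omega), hrelu, pvNbrAdd_eq_add, hvu, if_pos rfl]
      · rw [if_neg (by omega), if_neg hvu, hrel v.toNat hvlt, ← hvn]
    rw [hg2B k hk, hget (k : Int), hg1 (k : Int), hg1B k hk, hrelu, hrelv]
    by_cases h2 : k = v.toNat
    · rw [if_pos h2, if_pos (hkiv.mpr h2), pvNbrAdd_eq_add]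
    · rw [if_neg h2, if_neg (fun h => h2 (hkiv.mp h))]
      by_cases h3 : k = u.toNat
      · rw [if_pos h3, if_pos (hkiu.mpr h3), pvNbrAdd_eq_add]
      · rw [if_neg h3, if_neg (fun h => h3 (hkiu.mp h))]
        exact hrel k hk

-- folding all edges keeps the two representations aligned
theorem pvJoint (edges : List (Int × Int)) (d : PySem.Dict Int (PySem.Set Int))
    (ns : List (List Int)) (hd : pvInv d) (hr : pvRel d ns)
    (hpre : ∀ e ∈ edges, 0 ≤ e.1 ∧ e.1 < 14 ∧ 0 ≤ e.2 ∧ e.2 < 14) :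
    ∃ d' ns', edges.foldl pvAdjStep (some d) = some d' ∧
      edges.foldl pvNbrsStep (some ns) = some ns' ∧ pvInv d' ∧ pvRel d' ns' := by
  induction edges generalizing d ns with
  | nil => exact ⟨d, ns, rfl, rfl, hd, hr⟩
  | cons e t ih =>
    obtain ⟨h1, h2, h3, h4⟩ := hpre e (List.mem_cons_self)
    obtain ⟨d1, ns1, hstepA, hstepB, hinv1, hrel1⟩ :=
      pvStep_joint d ns hd hr e.1 e.2 ⟨h1, h2⟩ ⟨h3, h4⟩
    rw [List.foldl_cons, List.foldl_cons, (by rw [← hstepA] : pvAdjStep (some d) e = some d1),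
      (by rw [← hstepB] : pvNbrsStep (some ns) e = some ns1)]
    exact ih d1 ns1 hinv1 hrel1 (fun e' he' => hpre e' (List.mem_cons_of_mem _ he'))

-- all pairs (xs[i], xs[j]) with i < j, as B's while/for loop produces them
def pvPairs : List Int → List (Int × Int)
  | [] => []
  | c :: t => t.map (fun c2 => (c, c2)) ++ pvPairs t

theorem mem_pvPairs (cubs : List Int) (h : cubs.Pairwise (· < ·)) (k : Int × Int) :
    k ∈ pvPairs cubs ↔ k.1 ∈ cubs ∧ k.2 ∈ cubs ∧ k.1 < k.2 := by
  induction cubs with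
  | nil => simp [pvPairs]
  | cons c t ih =>
    rw [List.pairwise_cons] at h
    obtain ⟨hc, ht⟩ := h
    simp only [pvPairs, List.mem_append, List.mem_map, ih ht, List.mem_cons]
    constructor
    · rintro (⟨c2, hc2, rfl⟩ | ⟨h1, h2, h3⟩)
      · exact ⟨Or.inl rfl, Or.inr hc2, hc c2 hc2⟩
      · exact ⟨Or.inr h1, Or.inr h2, h3⟩
    · rintro ⟨h1 | h1, h2 | h2, h3⟩
      · omega
      · exact Or.inl ⟨k.2, h2, by rw [← h1]⟩
      · exact absurd h3 (by have := hc k.1 h1; omega)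
      · exact Or.inr ⟨h1, h2, h3⟩

theorem nodup_pvPairs (cubs : List Int) (h : cubs.Pairwise (· < ·)) :
    (pvPairs cubs).Nodup := by
  induction cubs with
  | nil => simp [pvPairs]
  | cons c t ih =>
    rw [List.pairwise_cons] at h
    obtain ⟨hc, ht⟩ := h
    refine List.Nodup.append ?_ (ih ht) ?_
    · exact (ht.nodup).map (fun a b hab => by simpa using hab)
    · intro p hp hp2
      obtain ⟨c2, hc2, rfl⟩ := List.mem_map.mp hp
      have hm := ((mem_pvPairs t ht _).mp hp2).1
      exact absurd (hc _ hm) (lt_irrefl c)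

-- B's while loop is a flat scatter over the encoded pairs of cubs
theorem pvScatter_eq (w : Int) (cubs : List Int) (d : PySem.Dict Int (List Int)) :
    pvScatter w cubs d
      = ((pvPairs cubs).map (fun p => p.1 * 14 + p.2)).foldl
          (fun d k => d.modify k [] (fun l => l ++ [w])) d := by
  induction cubs generalizing d with
  | nil => rfl
  | cons c t ih =>
    rw [pvScatter, ih, pvPairs, List.map_append, List.foldl_append, List.map_map]
    simp only [List.foldl_map]
    rfl

-- inner scatter fold: over a Nodup key list, appends w once to each listed key
theorem getD_scatter_inner (ks : List Int) (hnd : ks.Nodup) (w : Int)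
    (d : PySem.Dict Int (List Int)) (k : Int) :
    (ks.foldl (fun d k' => d.modify k' [] (fun l => l ++ [w])) d).getD k []
      = d.getD k [] ++ (if k ∈ ks then [w] else []) := by
  induction ks generalizing d with
  | nil => simp
  | cons k' ks' ih =>
    obtain ⟨hk', hnd'⟩ := List.nodup_cons.mp hnd
    rw [List.foldl_cons, ih hnd', PySem.Dict.getD_modify]
    by_cases hkk : k = k'
    · subst hkk; simp [hk']
    · simp [hkk]

-- outer scatter fold: the accumulated entry of k is the ws that scattered to k, in order
theorem getD_scatter (ws : List Int) (g : Int → List Int)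
    (hnd : ∀ w, (g w).Nodup) (d : PySem.Dict Int (List Int)) (k : Int) :
    (ws.foldl (fun d w => (g w).foldl (fun d k' => d.modify k' [] (fun l => l ++ [w])) d) d).getD k []
      = d.getD k [] ++ ws.filter (fun w => decide (k ∈ g w)) := by
  induction ws generalizing d with
  | nil => simp
  | cons w ws' ih =>
    rw [List.foldl_cons, ih, getD_scatter_inner (g w) (hnd w)]
    by_cases hm : k ∈ g w <;> simp [hm]

-- keys of the scatter dict: every scattered code, first occurrences in order
theorem keys_scatter (ws : List Int) (g : Int → List Int)
    (d : PySem.Dict Int (List Int)) :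
    (ws.foldl (fun d w => (g w).foldl (fun d k' => d.modify k' [] (fun l => l ++ [w])) d) d).keys
      = PySem.Set.update d.keys (ws.flatMap g) := by
  induction ws generalizing d with
  | nil => simp
  | cons w ws' ih =>
    rw [List.foldl_cons, ih, List.flatMap_cons, PySem.Set.update_append,
      PySem.Dict.keys_foldl_modify]

-- the sorted cubic-neighbor list of a vertex
def pvCubs (adj : PySem.Dict Int (PySem.Set Int)) (w : Int) : List Int :=
  PySem.List.sorted ((adj.getD w PySem.Set.empty).filter (fun x => decide (x < 8)))
    (fun x => x) false

theorem pvCubs_pairwise (adj : PySem.Dict Int (PySem.Set Int)) (hInv : pvInv adj) (w : Int) :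
    (pvCubs adj w).Pairwise (· < ·) := by
  have hnd : (pvCubs adj w).Nodup :=
    (PySem.List.sorted_perm _ _ _).nodup_iff.mpr ((hInv.2.1 w).filter _)
  have hle : (pvCubs adj w).Pairwise (fun a b => a ≤ b) :=
    PySem.List.sorted_pairwise (key := fun x => x) _
  exact (hle.and hnd).imp (fun h => lt_of_le_of_ne h.1 h.2)

theorem mem_pvCubs (adj : PySem.Dict Int (PySem.Set Int)) (w x : Int) :
    x ∈ pvCubs adj w ↔ x ∈ adj.getD w PySem.Set.empty ∧ x < 8 := by
  simp [pvCubs, PySem.List.mem_sorted, List.mem_filter]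

-- the encoded pair list of a vertex
def pvCodes (adj : PySem.Dict Int (PySem.Set Int)) (w : Int) : List Int :=
  (pvPairs (pvCubs adj w)).map (fun p => p.1 * 14 + p.2)

theorem pvCubs_bounds (adj : PySem.Dict Int (PySem.Set Int)) (hInv : pvInv adj) (w x : Int)
    (hx : x ∈ pvCubs adj w) : 0 ≤ x ∧ x < 8 := by
  rw [mem_pvCubs] at hx
  have := hInv.2.2.2 w x hx.1
  omega

theorem mem_pvCodes (adj : PySem.Dict Int (PySem.Set Int)) (hInv : pvInv adj) (w c1 c2 : Int)
    (h1 : 0 ≤ c1) (h12 : c1 < c2) (h2 : c2 < 14) :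
    c1 * 14 + c2 ∈ pvCodes adj w ↔ (c1, c2) ∈ pvPairs (pvCubs adj w) := by
  rw [pvCodes, List.mem_map]
  constructor
  · rintro ⟨p, hp, henc⟩
    have hb1 := pvCubs_bounds adj hInv w p.1
      (((mem_pvPairs _ (pvCubs_pairwise adj hInv w) p).mp hp).1)
    have hb2 := pvCubs_bounds adj hInv w p.2
      (((mem_pvPairs _ (pvCubs_pairwise adj hInv w) p).mp hp).2.1)
    have : p.1 = c1 ∧ p.2 = c2 := by omega
    rw [← this.1, ← this.2]
    rwa [Prod.mk.eta]
  · intro hp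
    exact ⟨(c1, c2), hp, rfl⟩

theorem nodup_pvCodes (adj : PySem.Dict Int (PySem.Set Int)) (hInv : pvInv adj) (w : Int) :
    (pvCodes adj w).Nodup := by
  refine (nodup_pvPairs _ (pvCubs_pairwise adj hInv w)).map_on ?_
  intro p hp q hq henc
  have hb1 := pvCubs_bounds adj hInv w p.1
    (((mem_pvPairs _ (pvCubs_pairwise adj hInv w) p).mp hp).1)
  have hb2 := pvCubs_bounds adj hInv w p.2
    (((mem_pvPairs _ (pvCubs_pairwise adj hInv w) p).mp hp).2.1)
  have hb3 := pvCubs_bounds adj hInv w q.1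
    (((mem_pvPairs _ (pvCubs_pairwise adj hInv w) q).mp hq).1)
  have hb4 := pvCubs_bounds adj hInv w q.2
    (((mem_pvPairs _ (pvCubs_pairwise adj hInv w) q).mp hq).2.1)
  have : p.1 = q.1 ∧ p.2 = q.2 := by omega
  calc p = (p.1, p.2) := by rw [Prod.mk.eta]
    _ = (q.1, q.2) := by rw [this.1, this.2]
    _ = q := by rw [Prod.mk.eta]

-- pvIndex, given the alignment, is the flat scatter over pvCodes
theorem pvIndex_eq (adj : PySem.Dict Int (PySem.Set Int)) (ns : List (List Int))
    (hr : pvRel adj ns) :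
    pvIndex ns = (PySem.List.pyRange 0 14 1).foldl (fun d w =>
      (pvCodes adj w).foldl (fun d k' => d.modify k' [] (fun l => l ++ [w])) d)
      PySem.Dict.empty := by
  rw [pvIndex]
  refine PySem.List.foldl_congr_mem' _ _ _ _ ?_
  intro w hw d
  obtain ⟨hwa, hwb⟩ := PySem.List.mem_pyRange_one.mp hw
  have hgd : PySem.List.pyGetD ns w [] = adj.getD w PySem.Set.empty := by
    have : w = ((w.toNat : Nat) : Int) := (Int.toNat_of_nonneg hwa).symm
    rw [this, PySem.List.pyGetD_natCast]
    exact hr.2 w.toNat (by omega)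
  rw [pvScatter_eq, hgd]
  rfl

-- KEY: the index entry of a cubic pair is the sorted intersection of their adjacency sets
theorem pvKey (adj : PySem.Dict Int (PySem.Set Int)) (ns : List (List Int))
    (hInv : pvInv adj) (hr : pvRel adj ns)
    (c1 c2 : Int) (h1 : 0 ≤ c1) (h12 : c1 < c2) (h2 : c2 < 8) :
    (pvIndex ns).getD (c1 * 14 + c2) []
    = PySem.List.sorted
        (PySem.Set.inter (adj.getD c1 PySem.Set.empty) (adj.getD c2 PySem.Set.empty))
        (fun x => x) false := by
  rw [pvIndex_eq adj ns hr,
    getD_scatter _ _ (nodup_pvCodes adj hInv) PySem.Dict.empty (c1 * 14 + c2)]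
  simp only [PySem.Dict.getD_empty, List.nil_append]
  refine (PySem.List.sorted_eq_of_perm_of_pairwise_lt _ _ _ ?_ ?_).symm
  · refine (List.perm_ext_iff_of_nodup ?_ ?_).mpr ?_
    · exact (PySem.List.nodup_pyRange_one 0 14).filter _
    · exact PySem.Set.nodup_inter _ _ (hInv.2.1 c1)
    · intro w
      have hsym := hInv.2.2.1
      have hbd := hInv.2.2.2
      rw [List.mem_filter, PySem.Set.mem_inter, decide_eq_true_eq,
        mem_pvCodes adj hInv w c1 c2 h1 h12 (by omega),
        mem_pvPairs _ (pvCubs_pairwise adj hInv w)]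
      simp only [mem_pvCubs]
      constructor
      · rintro ⟨_, ⟨hc1w, _⟩, ⟨hc2w, _⟩, _⟩
        exact ⟨(hsym w c1).mp hc1w, (hsym w c2).mp hc2w⟩
      · rintro ⟨hw1, hw2⟩
        have hb := hbd c1 w hw1
        exact ⟨PySem.List.mem_pyRange_one.mpr ⟨hb.1, hb.2⟩,
          ⟨(hsym w c1).mpr hw1, by omega⟩, ⟨(hsym w c2).mpr hw2, by omega⟩, h12⟩
  · exact (PySem.List.pairwise_lt_pyRange_one 0 14).filter _

-- the index's keys as a set: every code that some vertex scattered
theorem keys_pvIndex (adj : PySem.Dict Int (PySem.Set Int)) (ns : List (List Int))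
    (hr : pvRel adj ns) :
    (pvIndex ns).keys
      = PySem.Set.ofList ((PySem.List.pyRange 0 14 1).flatMap (pvCodes adj)) := by
  rw [pvIndex_eq adj ns hr, keys_scatter]
  simp [PySem.Set.update_nil_left]

-- A's lexicographic pair sweep, flattened, then encoded
def pvAllPairs : List (Int × Int) :=
  (PySem.List.pyRange 0 8 1).flatMap (fun c1 =>
    (PySem.List.pyRange (c1 + 1) 8 1).map (fun c2 => (c1, c2)))

theorem mem_pvAllPairs (p : Int × Int) :
    p ∈ pvAllPairs ↔ 0 ≤ p.1 ∧ p.1 < p.2 ∧ p.2 < 8 := by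
  simp only [pvAllPairs, List.mem_flatMap, List.mem_map, PySem.List.mem_pyRange_one]
  constructor
  · rintro ⟨c1, ⟨ha, hb⟩, c2, ⟨hc, hd⟩, rfl⟩
    exact ⟨ha, by omega, hd⟩
  · rintro ⟨h1, h2, h3⟩
    exact ⟨p.1, ⟨h1, by omega⟩, p.2, ⟨by omega, h3⟩, Prod.mk.eta⟩

-- every key of the index is an encoded pair in A's sweep range
theorem keys_sub (adj : PySem.Dict Int (PySem.Set Int)) (ns : List (List Int))
    (hInv : pvInv adj) (hr : pvRel adj ns) (k : Int) (hk : k ∈ (pvIndex ns).keys) :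
    ∃ p ∈ pvAllPairs, p.1 * 14 + p.2 = k := by
  rw [keys_pvIndex adj ns hr, PySem.Set.mem_ofList, List.mem_flatMap] at hk
  obtain ⟨w, _, hw⟩ := hk
  rw [pvCodes, List.mem_map] at hw
  obtain ⟨p, hp, henc⟩ := hw
  rw [mem_pvPairs _ (pvCubs_pairwise adj hInv w)] at hp
  have hb1 := pvCubs_bounds adj hInv w p.1 hp.1
  have hb2 := pvCubs_bounds adj hInv w p.2 hp.2.1
  exact ⟨p, (mem_pvAllPairs p).mpr ⟨hb1.1, hp.2.2, hb2.2⟩, henc⟩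

-- the sorted key sweep of B is A's pair sweep filtered to present keys
theorem sorted_keys_pvIndex (adj : PySem.Dict Int (PySem.Set Int)) (ns : List (List Int))
    (hInv : pvInv adj) (hr : pvRel adj ns) :
    PySem.List.sorted (pvIndex ns).keys (fun x => x) false
      = (pvAllPairs.map (fun p => p.1 * 14 + p.2)).filter
          (fun k => decide (k ∈ (pvIndex ns).keys)) := by
  refine PySem.List.sorted_eq_of_perm_of_pairwise_lt _ _ _ ?_ ?_
  · refine (List.perm_ext_iff_of_nodup (List.Nodup.filter _ ?_) ?_).mpr ?_
    · decide
    · rw [keys_pvIndex adj ns hr]; exact PySem.Set.nodup_ofList _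
    · intro k
      rw [List.mem_filter, decide_eq_true_eq]
      constructor
      · exact fun h => h.2
      · intro hk
        refine ⟨?_, hk⟩
        obtain ⟨p, hp, henc⟩ := keys_sub adj ns hInv hr k hk
        exact List.mem_map.mpr ⟨p, hp, henc⟩
  · exact List.Pairwise.filter _ (by decide)

-- fold over identity elements can be filtered away
theorem foldl_filter_id {α β : Type} (l : List α) (p : α → Bool) (f : β → α → β) (s : β)
    (h : ∀ x ∈ l, p x = false → ∀ s, f s x = s) :
    l.foldl f s = (l.filter p).foldl f s := by
  induction l generalizing s with
  | nil => rfl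
  | cons x t ih =>
    cases hx : p x with
    | true =>
      rw [List.foldl_cons, List.filter_cons_of_pos hx, List.foldl_cons]
      exact ih _ (fun y hy => h y (List.mem_cons_of_mem _ hy))
    | false =>
      rw [List.foldl_cons, List.filter_cons_of_neg (by simp [hx]),
        h x List.mem_cons_self hx s]
      exact ih _ (fun y hy => h y (List.mem_cons_of_mem _ hy))

-- decoding the pair code
theorem pvDecode (c1 c2 : Int) (h2 : 0 ≤ c2) (h3 : c2 < 14) :
    PySem.Int.floordiv (c1 * 14 + c2) 14 = c1 ∧ PySem.Int.mod (c1 * 14 + c2) 14 = c2 := by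
  have hf : PySem.Int.floordiv (c1 * 14 + c2) 14 = c1 := by
    rw [PySem.Int.floordiv_eq_iff_of_pos (by omega)]
    omega
  refine ⟨hf, ?_⟩
  have := PySem.Int.floordiv_mul_add_mod (c1 * 14 + c2) 14
  rw [hf] at this
  omega

-- the shared loop bodies, named for the fold algebra below
def pvBodyA (adj : PySem.Dict Int (PySem.Set Int))
    (st : List (List Int) × List (PySem.Set Int)) (p : Int × Int) :
    List (List Int) × List (PySem.Set Int) :=
  let n2 := adj.getD p.2 PySem.Set.empty
  let shared := PySem.Set.inter (adj.getD p.1 PySem.Set.empty) n2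
  if shared.length = 2 then
    match PySem.List.sorted shared (fun x => x) false with
    | [o1, o2] =>
      let key := PySem.Set.ofList [p.1, p.2, o1, o2]
      if st.2.any (fun s => PySem.Set.equal s key) then st
      else (st.1 ++ [PySem.List.sorted [p.1, p.2, o1, o2] (fun x => x) false],
            st.2 ++ [key])
    | _ => st
  else st

def pvBodyB (index : PySem.Dict Int (List Int))
    (st : List (List Int) × List (PySem.Set Int)) (code : Int) :
    List (List Int) × List (PySem.Set Int) :=
  let shared := index.getD code []
  if shared.length = 2 then
    let c1 := PySem.Int.floordiv code 14
    let c2 := PySem.Int.mod code 14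
    let o1 := shared.getD 0 0
    let o2 := shared.getD 1 0
    let key := PySem.Set.ofList [c1, c2, o1, o2]
    if st.2.any (fun s => PySem.Set.equal s key) then st
    else (st.1 ++ [PySem.List.sorted [c1, c2, o1, o2] (fun x => x) false],
          st.2 ++ [key])
  else st

-- the two main loops agree once the two adjacency representations are aligned
theorem pvMain (adj : PySem.Dict Int (PySem.Set Int)) (ns : List (List Int))
    (hInv : pvInv adj) (hr : pvRel adj ns) :
    ((PySem.List.pyRange 0 8 1).foldl (fun st c1 =>
      let n1 := adj.getD c1 PySem.Set.empty
      (PySem.List.pyRange (c1 + 1) 8 1).foldl (fun st c2 =>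
        let n2 := adj.getD c2 PySem.Set.empty
        let shared := PySem.Set.inter n1 n2
        if shared.length = 2 then
          match PySem.List.sorted shared (fun x => x) false with
          | [o1, o2] =>
            let key := PySem.Set.ofList [c1, c2, o1, o2]
            if st.2.any (fun s => PySem.Set.equal s key) then st
            else (st.1 ++ [PySem.List.sorted [c1, c2, o1, o2] (fun x => x) false],
                  st.2 ++ [key])
          | _ => st
        else st) st)
      (([], []) : List (List Int) × List (PySem.Set Int))).1
    = ((PySem.List.sorted (pvIndex ns).keys (fun x => x) false).foldl (fun st code =>
        let shared := (pvIndex ns).getD code []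
        if shared.length = 2 then
          let c1 := PySem.Int.floordiv code 14
          let c2 := PySem.Int.mod code 14
          let o1 := shared.getD 0 0
          let o2 := shared.getD 1 0
          let key := PySem.Set.ofList [c1, c2, o1, o2]
          if st.2.any (fun s => PySem.Set.equal s key) then st
          else (st.1 ++ [PySem.List.sorted [c1, c2, o1, o2] (fun x => x) false],
                st.2 ++ [key])
        else st)
        (([], []) : List (List Int) × List (PySem.Set Int))).1 := by
  refine congrArg Prod.fst ?_
  have hA : (PySem.List.pyRange 0 8 1).foldl (fun st c1 =>
      let n1 := adj.getD c1 PySem.Set.empty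
      (PySem.List.pyRange (c1 + 1) 8 1).foldl (fun st c2 =>
        let n2 := adj.getD c2 PySem.Set.empty
        let shared := PySem.Set.inter n1 n2
        if shared.length = 2 then
          match PySem.List.sorted shared (fun x => x) false with
          | [o1, o2] =>
            let key := PySem.Set.ofList [c1, c2, o1, o2]
            if st.2.any (fun s => PySem.Set.equal s key) then st
            else (st.1 ++ [PySem.List.sorted [c1, c2, o1, o2] (fun x => x) false],
                  st.2 ++ [key])
          | _ => st
        else st) st)
      (([], []) : List (List Int) × List (PySem.Set Int))
      = pvAllPairs.foldl (pvBodyA adj) (([], []) : List (List Int) × List (PySem.Set Int)) := by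
    rw [pvAllPairs, List.foldl_flatMap]
    refine PySem.List.foldl_congr_mem' _ _ _ _ (fun c1 _ st => ?_)
    rw [List.foldl_map]
    rfl
  have hskip : ∀ p ∈ pvAllPairs,
      ((fun k => decide (k ∈ (pvIndex ns).keys)) ∘ (fun p : Int × Int => p.1 * 14 + p.2)) p = false →
      ∀ st, pvBodyA adj st p = st := by
    intro p hp hnp st
    obtain ⟨hp1, hp12, hp2⟩ := (mem_pvAllPairs p).mp hp
    have hempty : PySem.Set.inter (adj.getD p.1 PySem.Set.empty)
        (adj.getD p.2 PySem.Set.empty) = [] := by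
      by_contra hne
      apply Bool.not_eq_true _ |>.mpr hnp
      simp only [Function.comp_apply, decide_eq_true_eq]
      rw [keys_pvIndex adj ns hr, PySem.Set.mem_ofList, List.mem_flatMap]
      obtain ⟨w, hw⟩ := List.exists_mem_of_ne_nil _ hne
      rw [PySem.Set.mem_inter] at hw
      have hsym := hInv.2.2.1
      have hbd := hInv.2.2.2
      have hwb := hbd p.1 w hw.1
      refine ⟨w, PySem.List.mem_pyRange_one.mpr ⟨hwb.1, hwb.2⟩, ?_⟩
      rw [pvCodes]
      refine List.mem_map.mpr ⟨(p.1, p.2), ?_, by rw [Prod.mk.eta]⟩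
      rw [mem_pvPairs _ (pvCubs_pairwise adj hInv w)]
      simp only [mem_pvCubs]
      exact ⟨⟨(hsym p.1 w).mp hw.1, by omega⟩, ⟨(hsym p.2 w).mp hw.2, by omega⟩, hp12⟩
    rw [pvBodyA]
    simp only [hempty]
    simp
  rw [sorted_keys_pvIndex adj ns hInv hr, List.filter_map, List.foldl_map, hA,
    foldl_filter_id pvAllPairs
      ((fun k => decide (k ∈ (pvIndex ns).keys)) ∘ (fun p : Int × Int => p.1 * 14 + p.2))
      (pvBodyA adj) _ hskip]
  refine PySem.List.foldl_congr_mem' _ _ _ _ (fun p hp st => ?_)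
  have hp' : p ∈ pvAllPairs := List.mem_of_mem_filter hp
  obtain ⟨hp1, hp12, hp2⟩ := (mem_pvAllPairs p).mp hp'
  have hkey := pvKey adj ns hInv hr p.1 p.2 hp1 hp12 hp2
  obtain ⟨hdiv, hmod⟩ := pvDecode p.1 p.2 (by omega) (by omega)
  show pvBodyA adj st p = pvBodyB (pvIndex ns) st (p.1 * 14 + p.2)
  rw [pvBodyA, pvBodyB]
  simp only [hkey, hdiv, hmod, PySem.List.length_sorted]
  by_cases hlen : (PySem.Set.inter (adj.getD p.1 PySem.Set.empty)
      (adj.getD p.2 PySem.Set.empty)).length = 2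
  · simp only [if_pos hlen]
    have hL : (PySem.List.sorted (PySem.Set.inter (adj.getD p.1 PySem.Set.empty)
        (adj.getD p.2 PySem.Set.empty)) (fun x => x) false).length = 2 := by
      rw [PySem.List.length_sorted]; exact hlen
    rcases hE : PySem.List.sorted (PySem.Set.inter (adj.getD p.1 PySem.Set.empty)
        (adj.getD p.2 PySem.Set.empty)) (fun x => x) false with _ | ⟨o1, _ | ⟨o2, _ | ⟨o3, t⟩⟩⟩ <;>
      first
      | rfl
      | (rw [hE] at hL; simp at hL)
  · simp only [if_neg hlen]

-- ===== VERDICT (by name: the statement is the Claim_ definition above) =====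
theorem build_faces_py_spec : Claim_equal_build_faces_py := by
  intro edges _hdom hpre
  unfold Spec_build_faces_py
  obtain ⟨adj, ns, hadj, hnbrs, hInv, hrel⟩ :=
    pvJoint edges pvAdjInit (List.replicate 14 []) pvInv_init pvRel_init hpre
  unfold build_faces_py build_faces_py_alt pvAdj pvNbrs
  rw [hadj, hnbrs]
  simp only [Option.elim]
  exact pvMain adj ns hInv hrel
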